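-- pv_equiv track=rewrite | github.com/42433422/xc-mamba-compiler | training/train_xc_mamba.py | balanced_by_feature
-- ===== SOURCE A (Python) =====
-- from typing import Any, Dict, List
--
-- def balanced_by_feature(rows: List[dict], cap_per_tag: int = 20000) -> List[dict]:
--     buckets: Dict[str, List[dict]] = {}
--     for r in rows:
--         tags = r.get("feature_tags") or ["_untagged"]
--         buckets.setdefault(tags[0], []).append(r)
--     out: List[dict] = []
--     for _, items in buckets.items():
--         out.extend(items[:cap_per_tag])
--     return out
-- ===== SOURCE B (Python) =====
-- from typing import Any, Dict, List
--
-- def balanced_by_feature(rows: List[dict], cap_per_tag: int = 20000) -> List[dict]: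
--     out: List[dict] = []
--     pending = list(rows)
--     while pending:
--         k = (pending[0].get("feature_tags") or ["_untagged"])[0]
--         same = [r for r in pending if ((r.get("feature_tags") or ["_untagged"])[0]) == k]
--         out.extend(same[:cap_per_tag])
--         pending = [r for r in pending if ((r.get("feature_tags") or ["_untagged"])[0]) != k]
--     return out
-- ===== Notes on version B (the rewrite author's own statement) =====
-- stated objective: alternative
-- what changed: Replaces the dict-of-buckets accumulation plus a second emit loop with a single worklist loop that repeatedly peels off the entire group of rows sharing the first pending row's tag (filter + the same [:cap_per_tag] slice) and continues on the remaining rows.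
import Mathlib
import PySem

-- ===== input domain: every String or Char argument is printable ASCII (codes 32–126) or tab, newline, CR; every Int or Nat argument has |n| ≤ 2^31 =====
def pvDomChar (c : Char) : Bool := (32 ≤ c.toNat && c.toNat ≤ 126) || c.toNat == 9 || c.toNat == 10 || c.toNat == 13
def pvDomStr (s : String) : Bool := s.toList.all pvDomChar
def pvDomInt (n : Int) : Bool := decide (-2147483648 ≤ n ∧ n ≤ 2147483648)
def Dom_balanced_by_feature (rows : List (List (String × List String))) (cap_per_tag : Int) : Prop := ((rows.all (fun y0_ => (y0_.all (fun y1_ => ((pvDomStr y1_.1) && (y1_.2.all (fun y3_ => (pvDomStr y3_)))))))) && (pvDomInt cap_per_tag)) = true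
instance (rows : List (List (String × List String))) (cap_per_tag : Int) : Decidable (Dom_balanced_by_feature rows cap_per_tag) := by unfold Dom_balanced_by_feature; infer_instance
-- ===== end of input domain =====

-- B replaces A's one-pass dict-of-buckets accumulation with a worklist loop that peels off one whole
-- tag-group per iteration (filter same-tag rows, cap by the same slice, recurse on the rest); objective: alternative.

-- tag key '(r.get("feature_tags") or ["_untagged"])[0]' — shared by both Pythons verbatim
def tagOf (r : List (String × List String)) : String :=
  match (PySem.Dict.mk r).get? "feature_tags" with
  | some (t :: _) => t
  | _ => "_untagged"

-- ===== PORT A =====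
-- 'buckets.setdefault(tags[0], []).append(r)' is exactly Dict.modify tag [] (· ++ [r])
def balanced_by_feature (rows : List (List (String × List String))) (cap_per_tag : Int) : List (List (String × List String)) :=
  let buckets : PySem.Dict String (List (List (String × List String))) :=
    rows.foldl (fun b r => b.modify (tagOf r) [] (· ++ [r])) PySem.Dict.empty
  buckets.items.foldl (fun out kv => out ++ PySem.List.slice kv.2 none (some cap_per_tag)) []

-- ===== PORT B =====
-- the 'while pending:' loop of Source B: out accumulates, pending shrinks by one whole tag-group per step
def bfGo (out : List (List (String × List String))) (pending : List (List (String × List String))) (cap_per_tag : Int) : List (List (String × List String)) :=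
  match pending with
  | [] => out
  | r :: t =>
    let k := tagOf r
    let same := (r :: t).filter (fun x => tagOf x == k)
    bfGo (out ++ PySem.List.slice same none (some cap_per_tag))
         ((r :: t).filter (fun x => !(tagOf x == k))) cap_per_tag
termination_by pending.length
decreasing_by
  simp only [List.filter_cons, beq_self_eq_true, Bool.not_true, if_false, Bool.false_eq_true,
    List.length_cons]
  exact Nat.lt_succ_of_le (List.length_filter_le _ _)

def balanced_by_feature_alt (rows : List (List (String × List String))) (cap_per_tag : Int) : List (List (String × List String)) :=
  bfGo [] rows cap_per_tag

-- ===== PRECONDITION & SPEC =====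
def Spec_balanced_by_feature (rows : List (List (String × List String))) (cap_per_tag : Int) (out : List (List (String × List String))) : Prop := out = balanced_by_feature_alt rows cap_per_tag
instance (rows : List (List (String × List String))) (cap_per_tag : Int) (out : List (List (String × List String))) : Decidable (Spec_balanced_by_feature rows cap_per_tag out) := by unfold Spec_balanced_by_feature; infer_instance

-- ===== CLAIM (what is proved, stated in full; the proofs are below) =====
def Claim_equal_balanced_by_feature : Prop := ∀ (rows : List (List (String × List String))) (cap_per_tag : Int), Dom_balanced_by_feature rows cap_per_tag → Spec_balanced_by_feature rows cap_per_tag (balanced_by_feature rows cap_per_tag)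

-- ===== LEMMAS AND PROOFS =====

-- intermediate characterisation: groups in first-tag-appearance order, each group a capped filter
def bfSpec (rows : List (List (String × List String))) (cap : Int) : List (List (String × List String)) :=
  (PySem.Set.ofList (rows.map tagOf)).flatMap
    (fun k => PySem.List.slice (rows.filter (fun r => tagOf r == k)) none (some cap))

-- A's bucket-building loop, reshaped as a fold over (key, row) pairs
theorem buckets_eq_pairs (rows : List (List (String × List String))) :
    rows.foldl (fun b r => b.modify (tagOf r) [] (· ++ [r])) PySem.Dict.empty
      = (rows.map (fun r => (tagOf r, r))).foldl
          (fun b p => b.modify p.1 [] (· ++ [p.2])) PySem.Dict.empty := by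
  rw [List.foldl_map]

theorem a_eq_spec (rows : List (List (String × List String))) (cap : Int) :
    balanced_by_feature rows cap = bfSpec rows cap := by
  unfold balanced_by_feature bfSpec
  set buckets := rows.foldl (fun b r => b.modify (tagOf r) [] (· ++ [r])) PySem.Dict.empty with hb
  have hnd : buckets.keys.Nodup := by
    rw [hb]
    exact PySem.Dict.nodup_keys_foldl_modify_key rows tagOf []
      (fun b r => (· ++ [r])) PySem.Dict.empty PySem.Dict.nodup_keys_empty
  have hkeys : buckets.keys = PySem.Set.ofList (rows.map tagOf) := by
    rw [hb, PySem.Dict.keys_foldl_modify_key, PySem.Dict.keys_empty]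
    rfl
  have hget : ∀ k, buckets.getD k [] = rows.filter (fun r => tagOf r == k) := by
    intro k
    rw [hb, buckets_eq_pairs, PySem.Dict.getD_foldl_modify_append, PySem.Dict.getD_empty]
    simp [List.filter_map, Function.comp_def]
  rw [PySem.List.foldl_append_eq_flatMap,
    PySem.Dict.items_eq_map_keys buckets hnd [], List.flatMap_map, hkeys]
  simp only [List.nil_append, hget]

-- peeling one element off a Set-building fold: the head goes first, its duplicates are skipped
theorem foldl_add_cons (a : String) (l : List String) : ∀ (s : List String),
    l.foldl PySem.Set.add (a :: s)
      = a :: (l.filter (fun x => !(x == a))).foldl PySem.Set.add s := by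
  induction l with
  | nil => intro s; rfl
  | cons x l ih =>
    intro s
    by_cases h : x = a
    · subst h
      simp only [List.foldl_cons, List.filter_cons, beq_self_eq_true, Bool.not_true,
        Bool.false_eq_true, reduceIte]
      have : PySem.Set.add (x :: s) x = x :: s := by
        simp [PySem.Set.add, PySem.Set.contains]
      rw [this, ih]
    · have hb : (x == a) = false := beq_eq_false_iff_ne.mpr h
      have hb' : (a == x) = false := beq_eq_false_iff_ne.mpr (Ne.symm h)
      simp only [List.foldl_cons, List.filter_cons, hb, Bool.not_false, reduceIte]
      have : PySem.Set.add (a :: s) x = a :: PySem.Set.add s x := by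
        by_cases hm : x ∈ s <;> simp [PySem.Set.add, PySem.Set.contains, h, hm]
      rw [this, ih]

theorem ofList_cons (a : String) (l : List String) :
    PySem.Set.ofList (a :: l)
      = a :: PySem.Set.ofList (l.filter (fun x => !(x == a))) := by
  rw [PySem.Set.ofList_eq_foldl, PySem.Set.ofList_eq_foldl, List.foldl_cons]
  exact foldl_add_cons a l _

-- rows with the already-extracted tag k do not affect a later group's filter
theorem filter_rest (t : List (List (String × List String))) (k k' : String) (h : (k' == k) = false) :
    (t.filter (fun x => !(tagOf x == k))).filter (fun r => tagOf r == k')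
      = t.filter (fun r => tagOf r == k') := by
  induction t with
  | nil => rfl
  | cons x t ih =>
    by_cases hx : tagOf x = k
    · have h1 : (tagOf x == k) = true := beq_iff_eq.mpr hx
      have h2 : (tagOf x == k') = false := by
        apply beq_eq_false_iff_ne.mpr
        intro hxe
        rw [hxe] at hx
        exact absurd (beq_iff_eq.mpr hx) (by simp [h])
      simp [h1, h2, ih]
    · have h1 : (tagOf x == k) = false := beq_eq_false_iff_ne.mpr hx
      simp [h1]
      rw [List.filter_cons, List.filter_cons, ih]

theorem spec_peel (r : List (String × List String)) (t : List (List (String × List String))) (cap : Int) :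
    bfSpec (r :: t) cap
      = PySem.List.slice ((r :: t).filter (fun x => tagOf x == tagOf r)) none (some cap)
        ++ bfSpec ((r :: t).filter (fun x => !(tagOf x == tagOf r))) cap := by
  unfold bfSpec
  set k := tagOf r with hk
  have hhead : (tagOf r == k) = true := by simp [hk]
  have hrest : (r :: t).filter (fun x => !(tagOf x == k)) = t.filter (fun x => !(tagOf x == k)) := by
    simp [hhead]
  rw [hrest, List.map_cons, ofList_cons]
  have hmapfilter : ((t.map tagOf).filter (fun x => !(x == k)))
      = (t.filter (fun x => !(tagOf x == k))).map tagOf := by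
    rw [List.filter_map]; rfl
  rw [hmapfilter, List.flatMap_cons]
  congr 1
  apply List.flatMap_congr
  intro k' hk'
  have hk'mem : k' ∈ List.map tagOf (List.filter (fun x => !(tagOf x == k)) t) := by
    simpa [PySem.Set.mem_ofList] using hk'
  obtain ⟨r', hr', rfl⟩ := List.mem_map.mp hk'mem
  have hne : (tagOf r' == k) = false := by
    simpa using (List.mem_filter.mp hr').2
  have hhead' : (tagOf r == tagOf r') = false := by
    apply beq_eq_false_iff_ne.mpr
    intro he
    rw [← he] at hne
    rw [hk] at hne
    simp at hne
  congr 1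
  rw [List.filter_cons]
  simp only [hhead', Bool.false_eq_true, reduceIte]
  exact (filter_rest t k (tagOf r') hne).symm

theorem spec_eq_go : ∀ (n : Nat) (p : List (List (String × List String))), p.length ≤ n →
    ∀ (out : List (List (String × List String))) (cap : Int),
    bfGo out p cap = out ++ bfSpec p cap := by
  intro n
  induction n with
  | zero =>
    intro p hp out cap
    have : p = [] := List.eq_nil_of_length_eq_zero (Nat.le_zero.mp hp)
    subst this
    simp [bfGo, bfSpec]
  | succ n ih =>
    intro p hp out cap
    match p with
    | [] => simp [bfGo, bfSpec]
    | r :: t =>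
      rw [bfGo, spec_peel]
      have hlen : ((r :: t).filter (fun x => !(tagOf x == tagOf r))).length ≤ n := by
        have : (r :: t).filter (fun x => !(tagOf x == tagOf r)) = t.filter (fun x => !(tagOf x == tagOf r)) := by
          simp
        rw [this]
        exact le_trans (List.length_filter_le _ _) (Nat.le_of_succ_le_succ hp)
      rw [ih _ hlen, List.append_assoc]

-- ===== VERDICT (by name: the statement is the Claim_ definition above) =====
theorem balanced_by_feature_spec : Claim_equal_balanced_by_feature := by
  intro rows cap _
  unfold Spec_balanced_by_feature balanced_by_feature_alt
  rw [a_eq_spec, spec_eq_go rows.length rows le_rfl [] cap, List.nil_append]
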